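-- pv_equiv track=rewrite | github.com/pattamatha/204111 | 64_01_Programming(204111)/Lab_Coding/Lab11/Lab11_3_640510668.py | coprime_factor
-- ===== SOURCE A (Python) =====
-- import math
--
-- def prime_factor(n):
-- 	if n == 0 or n == 1:
-- 		return []
-- 	else: # n > 1
-- 		fac = []
-- 		div = 2	# ตัวประกอบเฉพาะจะเริ่มที่ 2
-- 		num = n # ใช้ num เป็นตัวกำหนดขอบเขตของตัวประกอบ
-- 		while div <= math.sqrt(num) + 1:
-- 			if n % div == 0:
-- 				fac.append(div)
-- 				n = n // div
-- 			else:
-- 				div += 1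
-- 		if div > math.sqrt(num) + 1 and n > 1:
-- 			fac.append(n)
-- 	return fac
--
-- def coprime_factor(a, b):
-- 	list_a = prime_factor(a)
-- 	list_b = prime_factor(b)
-- 	#list_a = [2, 2, 3, 3, 5]
-- 	#list_b = [2, 2, 2, 2, 3]
-- 	count_a = {}	# นับความถี่ของตัวประกอบเฉพาะแต่ละตัวใน list_a
-- 	for c in list_a:
-- 		if c in count_a:
-- 			count_a[c] += 1
-- 		else:
-- 			count_a[c] = 1
-- 	count_b = {}	# นับความถี่ของตัวประกอบเฉพาะแต่ละตัว list_b
-- 	for c in list_b: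
-- 		if c in count_b:
-- 			count_b[c] += 1
-- 		else:
-- 			count_b[c] = 1
-- 	# count_a = {2: 2, 3: 2, 5: 1}
-- 	# count_b = {2: 4, 3: 1}
-- 	inter = count_a.keys() & count_b.keys() # หาส่วนที่ intersection ของ count_a และ count_b
-- 	result = []
-- 	for num in inter:
-- 		if count_a[num] > count_b[num]: # เวลาที่จะหาส่วนที่ซ้ำกัน เราจะเอาตัวที่ซ้ำกัน จำนวนที่น้อยที่สุดจากlistใดlistนึง
-- 			result.extend([num] * count_b[num])
-- 		else: # ในกรณีที่มีตัวซ้ำเท่ากัน สามารถใช้จำนวนตัวซ้ำจากlistใดก็ได้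
-- 			result.extend([num] * count_a[num])
-- 	result.sort() # เรียงลำดับจากน้อยไปมากด้วย
-- 	return result
-- ===== SOURCE B (Python) =====
-- import math
--
-- def prime_factor(n):
-- 	if n == 0 or n == 1:
-- 		return []
-- 	else: # n > 1
-- 		fac = []
-- 		div = 2
-- 		num = n
-- 		while div <= math.sqrt(num) + 1:
-- 			if n % div == 0:
-- 				fac.append(div)
-- 				n = n // div
-- 			else:
-- 				div += 1
-- 		if div > math.sqrt(num) + 1 and n > 1:
-- 			fac.append(n)
-- 	return fac
--
-- def coprime_factor(a, b):
-- 	# Two-pointer merge of the two ascending factor lists: collects each common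
-- 	# prime min(multiplicity) times, already in sorted order -- no dicts, no sort.
-- 	list_a = prime_factor(a)
-- 	list_b = prime_factor(b)
-- 	result = []
-- 	i = 0
-- 	j = 0
-- 	while i < len(list_a) and j < len(list_b):
-- 		if list_a[i] == list_b[j]:
-- 			result.append(list_a[i])
-- 			i += 1
-- 			j += 1
-- 		elif list_a[i] < list_b[j]:
-- 			i += 1
-- 		else:
-- 			j += 1
-- 	return result
-- ===== Notes on version B (the rewrite author's own statement) =====
-- stated objective: simpler
-- what changed: B keeps prime_factor unchanged but replaces A's two counting dicts, key-set intersection, per-key min branch and trailing sort with a single two-pointer merge of the two already-ascending factor lists, which emits each common prime min(multiplicity) times directly in sorted order.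
import Mathlib
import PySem

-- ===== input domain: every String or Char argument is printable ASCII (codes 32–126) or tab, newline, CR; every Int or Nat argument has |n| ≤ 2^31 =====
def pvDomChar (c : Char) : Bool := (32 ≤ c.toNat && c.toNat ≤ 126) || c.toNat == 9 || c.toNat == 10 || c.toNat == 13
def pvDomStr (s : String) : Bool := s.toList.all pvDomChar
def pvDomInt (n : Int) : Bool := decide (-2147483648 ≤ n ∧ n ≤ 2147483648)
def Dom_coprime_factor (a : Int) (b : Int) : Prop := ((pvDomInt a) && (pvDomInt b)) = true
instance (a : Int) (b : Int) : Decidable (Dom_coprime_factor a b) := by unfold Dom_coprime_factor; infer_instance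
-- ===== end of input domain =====

-- B replaces A's two counting dicts + key-set intersection + trailing sort by a single
-- two-pointer merge of the two already-ascending factor lists (same prime_factor helper).

-- ===== PORT A =====
-- while loop of prime_factor; fuel only makes the recursion structural, it never runs out
-- on the admitted inputs (div stops at about sqrt(num)+2 and n only shrinks).
-- 'div <= math.sqrt(num)+1' is exactly '(div-1)^2 <= num' here: div is an integer ≥ 2 and for
-- 0 ≤ num ≤ 2^31 the double sqrt(num)+1 is within 1e-9 of the real value, while a non-square
-- num keeps sqrt(num) at least ~1e-5 away from any integer (exact squares are exact doubles).
def pvPFLoop : Nat → Int → Int → Int → List Int → List Int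
  | 0, _, _, _, fac => fac
  | f + 1, n, div, num, fac =>
    if (div - 1) * (div - 1) ≤ num then
      if PySem.Int.mod n div = 0 then
        pvPFLoop f (PySem.Int.floordiv n div) div num (fac ++ [div])
      else
        pvPFLoop f n (div + 1) num fac
    else
      if num < (div - 1) * (div - 1) ∧ 1 < n then fac ++ [n] else fac

def prime_factor (n : Int) : List Int :=
  if n = 0 ∨ n = 1 then []
  else pvPFLoop (2 * n.toNat + 4) n 2 n []

-- 'if c in count: count[c] += 1 else: count[c] = 1' over the list
def pvCounter (l : List Int) : PySem.Dict Int Int :=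
  l.foldl (fun d c => if d.contains c then d.insert c (d.getD c 0 + 1) else d.insert c 1)
    PySem.Dict.empty

def coprime_factor (a : Int) (b : Int) : List Int :=
  let list_a := prime_factor a
  let list_b := prime_factor b
  let count_a := pvCounter list_a
  let count_b := pvCounter list_b
  let inter : PySem.Set Int := PySem.Set.inter count_a.keys count_b.keys
  let result := inter.foldl (fun r num =>
    if count_a.getD num 0 > count_b.getD num 0 then
      r ++ PySem.List.pyRepeat [num] (count_b.getD num 0)
    else
      r ++ PySem.List.pyRepeat [num] (count_a.getD num 0)) []
  PySem.List.sorted result (fun x => x) false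

-- ===== PORT B =====
-- the two-pointer while loop of Source B, as suffix recursion on the two lists
def pvMerge : List Int → List Int → List Int
  | x :: xs, y :: ys =>
    if x = y then x :: pvMerge xs ys
    else if x < y then pvMerge xs (y :: ys)
    else pvMerge (x :: xs) ys
  | _, _ => []
termination_by l1 l2 => l1.length + l2.length
decreasing_by all_goals (simp only [List.length_cons]; omega)

def coprime_factor_alt (a : Int) (b : Int) : List Int :=
  pvMerge (prime_factor a) (prime_factor b)

-- ===== PRECONDITION & SPEC =====
-- Pre_ excludes exactly the inputs where the Python raises: a negative argument reaches
-- math.sqrt(num) with num < 0, a ValueError (in A and in B alike).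
def Pre_coprime_factor (a : Int) (b : Int) : Prop := 0 ≤ a ∧ 0 ≤ b
instance (a : Int) (b : Int) : Decidable (Pre_coprime_factor a b) := by
  unfold Pre_coprime_factor; infer_instance
def pvWitness_coprime_factor : Int × Int := (12, 18)

def Spec_coprime_factor (a : Int) (b : Int) (out : List Int) : Prop := out = coprime_factor_alt a b
instance (a : Int) (b : Int) (out : List Int) : Decidable (Spec_coprime_factor a b out) := by
  unfold Spec_coprime_factor; infer_instance

-- ===== CLAIM (what is proved, stated in full; the proofs are below) =====
def Claim_equal_coprime_factor : Prop := ∀ (a : Int) (b : Int), Dom_coprime_factor a b →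
  Pre_coprime_factor a b → Spec_coprime_factor a b (coprime_factor a b)

-- ===== LEMMAS AND PROOFS =====

-- Invariant of A's factor loop: the accumulator is ascending, bounded by div, and the
-- remaining n has no divisor below div; hence the produced list is ascending.
theorem pvPFLoop_pairwise (f : Nat) (n div num : Int) (fac : List Int)
    (h1 : fac.Pairwise (· ≤ ·)) (h2 : ∀ e ∈ fac, e ≤ div)
    (h3 : ∀ d : Int, 2 ≤ d → d < div → PySem.Int.mod n d ≠ 0) (h4 : 2 ≤ div) :
    (pvPFLoop f n div num fac).Pairwise (· ≤ ·) := by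
  induction f generalizing n div fac with
  | zero => simpa [pvPFLoop] using h1
  | succ f ih =>
    simp only [pvPFLoop]
    split_ifs with hc hm hfin
    · -- div divides n
      apply ih (PySem.Int.floordiv n div) div
      · exact List.pairwise_append.2 ⟨h1, by simp, by
          intro x hx y hy; simp at hy; subst hy; exact h2 x hx⟩
      · intro e he
        rcases List.mem_append.1 he with h | h
        · exact h2 e h
        · simp at h; omega
      · intro d hd2 hdd hmod
        have hdvd : d ∣ PySem.Int.floordiv n div := (PySem.Int.mod_eq_zero_iff_dvd _ _).1 hmod
        have hn : PySem.Int.floordiv n div * div = n := by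
          have := PySem.Int.floordiv_mul_add_mod n div; omega
        exact h3 d hd2 hdd ((PySem.Int.mod_eq_zero_iff_dvd _ _).2 (hn ▸ hdvd.mul_right div))
      · exact h4
    · -- div does not divide n
      apply ih n (div + 1)
      · exact h1
      · exact fun e he => le_trans (h2 e he) (by omega)
      · intro d hd2 hdd
        rcases lt_or_eq_of_le (by omega : d ≤ div) with h | h
        · exact h3 d hd2 h
        · subst h; exact hm
      · omega
    · -- loop exited, n > 1 is appended
      have hdivn : div ≤ n := by
        by_contra h
        push Not at h
        exact h3 n (by omega) h ((PySem.Int.mod_eq_zero_iff_dvd n n).2 dvd_rfl)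
      refine List.pairwise_append.2 ⟨h1, by simp, ?_⟩
      intro x hx y hy; simp at hy; subst hy
      exact le_trans (h2 x hx) hdivn
    · exact h1

theorem prime_factor_pairwise (n : Int) : (prime_factor n).Pairwise (· ≤ ·) := by
  unfold prime_factor
  split
  · simp
  · exact pvPFLoop_pairwise _ n 2 n [] (by simp) (by simp) (by intro d h1 h2; omega) le_rfl

-- A's guarded counter loop is the unconditional 'd[c] = d.get(c, 0) + 1' loop
theorem pvCounter_eq (l : List Int) :
    pvCounter l = l.foldl (fun d x => d.insert x (d.getD x 0 + 1)) PySem.Dict.empty := by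
  unfold pvCounter
  congr 1
  funext d c
  by_cases h : d.contains c = true
  · simp [h]
  · have h0 : d.getD c 0 = 0 :=
      PySem.Dict.getD_of_not_contains d 0 (by simpa using h)
    simp [h, h0]

theorem pvCounter_getD (l : List Int) (v : Int) :
    (pvCounter l).getD v 0 = (l.count v : Int) := by
  rw [pvCounter_eq]
  simpa using PySem.Dict.getD_foldl_insert_add_one l PySem.Dict.empty v

theorem pvCounter_keys (l : List Int) : (pvCounter l).keys = PySem.Set.ofList l := by
  rw [pvCounter_eq]
  rw [show (fun (d : PySem.Dict Int Int) (x : Int) => d.insert x (d.getD x 0 + 1)) =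
      (fun d x => d.insert x ((fun (d : PySem.Dict Int Int) (x : Int) => d.getD x 0 + 1) d x)) from rfl,
    PySem.Dict.keys_foldl_insert]
  rfl

theorem mem_interKeys (la lb : List Int) (z : Int) :
    z ∈ PySem.Set.inter (pvCounter la).keys (pvCounter lb).keys ↔ z ∈ la ∧ z ∈ lb := by
  rw [pvCounter_keys, pvCounter_keys, PySem.Set.mem_inter]
  simp [PySem.Set.mem_ofList]

theorem nodup_interKeys (la lb : List Int) :
    (PySem.Set.inter (pvCounter la).keys (pvCounter lb).keys).Nodup := by
  rw [pvCounter_keys, pvCounter_keys]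
  exact (PySem.Set.nodup_ofList la).filter _

-- count of the concatenation A builds over the (duplicate-free) key intersection
theorem count_flatMap_eq (I : List Int) (g : Int → List Int) (z : Int) (hnd : I.Nodup)
    (hz : ∀ k ∈ I, k ≠ z → (g k).count z = 0) :
    (I.flatMap g).count z = if z ∈ I then (g z).count z else 0 := by
  induction I with
  | nil => simp
  | cons k I ih =>
    rw [List.flatMap_cons, List.count_append,
      ih (List.nodup_cons.1 hnd).2 (fun k' h h' => hz k' (List.mem_cons_of_mem _ h) h')]
    by_cases hk : k = z
    · subst hk
      have : k ∉ I := (List.nodup_cons.1 hnd).1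
      simp [this]
    · have : (g k).count z = 0 := hz k (List.mem_cons_self) hk
      simp only [List.mem_cons]
      rcases eq_or_ne z k with h | h
      · exact absurd h.symm hk
      · simp [h, this]

theorem count_eq_zero_of_lt_head (y z : Int) (ys : List Int)
    (hp : (y :: ys).Pairwise (· ≤ ·)) (hzy : z < y) : (y :: ys).count z = 0 := by
  rw [List.count_eq_zero]
  intro hmem
  rcases List.mem_cons.1 hmem with h | h
  · omega
  · have := (List.pairwise_cons.1 hp).1 z h
    omega

theorem mem_pvMerge (xs ys : List Int) (e : Int) (h : e ∈ pvMerge xs ys) : e ∈ xs := by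
  induction xs, ys using pvMerge.induct with
  | case1 xs y ys ih =>
    rw [pvMerge, if_pos rfl] at h
    rcases List.mem_cons.1 h with h | h
    · simp [h]
    · exact List.mem_cons_of_mem _ (ih h)
  | case2 x xs y ys heq hlt ih =>
    rw [pvMerge, if_neg heq, if_pos hlt] at h
    exact List.mem_cons_of_mem _ (ih h)
  | case3 x xs y ys heq hlt ih =>
    rw [pvMerge, if_neg heq, if_neg hlt] at h
    exact ih h
  | case4 xs ys h1 =>
    cases xs with
    | nil => simp [pvMerge] at h
    | cons x xs =>
      cases ys with
      | nil => simp [pvMerge] at h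
      | cons y ys => exact (h1 x xs y ys rfl rfl).elim

theorem pvMerge_pairwise (xs ys : List Int) (hxs : xs.Pairwise (· ≤ ·)) :
    (pvMerge xs ys).Pairwise (· ≤ ·) := by
  induction xs, ys using pvMerge.induct with
  | case1 xs y ys ih =>
    rw [pvMerge, if_pos rfl]
    refine List.pairwise_cons.2 ⟨?_, ih (List.pairwise_cons.1 hxs).2⟩
    intro e he
    exact (List.pairwise_cons.1 hxs).1 e (mem_pvMerge xs ys e he)
  | case2 x xs y ys heq hlt ih =>
    rw [pvMerge, if_neg heq, if_pos hlt]
    exact ih (List.pairwise_cons.1 hxs).2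
  | case3 x xs y ys heq hlt ih =>
    rw [pvMerge, if_neg heq, if_neg hlt]
    exact ih hxs
  | case4 xs ys h1 =>
    cases xs with
    | nil => simp [pvMerge]
    | cons x xs =>
      cases ys with
      | nil => simp [pvMerge]
      | cons y ys => exact (h1 x xs y ys rfl rfl).elim

theorem count_pvMerge (xs ys : List Int) (z : Int) (hxs : xs.Pairwise (· ≤ ·))
    (hys : ys.Pairwise (· ≤ ·)) :
    (pvMerge xs ys).count z = min (xs.count z) (ys.count z) := by
  induction xs, ys using pvMerge.induct with
  | case1 xs y ys ih =>
    rw [pvMerge, if_pos rfl]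
    rw [List.count_cons, List.count_cons, List.count_cons,
      ih (List.pairwise_cons.1 hxs).2 (List.pairwise_cons.1 hys).2]
    rcases eq_or_ne z y with h | h
    · simp [h]
    · simp [Ne.symm h]
  | case2 x xs y ys heq hlt ih =>
    rw [pvMerge, if_neg heq, if_pos hlt, ih (List.pairwise_cons.1 hxs).2 hys]
    rcases eq_or_ne z x with h | h
    · subst h
      rw [count_eq_zero_of_lt_head y z ys hys hlt]
      simp
    · simp [List.count_cons, Ne.symm h]
  | case3 x xs y ys heq hlt ih =>
    rw [pvMerge, if_neg heq, if_neg hlt, ih hxs (List.pairwise_cons.1 hys).2]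
    rcases eq_or_ne z y with h | h
    · subst h
      rw [count_eq_zero_of_lt_head x z xs hxs (by omega)]
      simp
    · simp [List.count_cons, Ne.symm h]
  | case4 xs ys h1 =>
    cases xs with
    | nil => simp [pvMerge]
    | cons x xs =>
      cases ys with
      | nil => simp [pvMerge]
      | cons y ys => exact (h1 x xs y ys rfl rfl).elim

-- counts of A's pre-sort concatenation: min of the two multiplicities
theorem countA_eq_min (la lb : List Int) (z : Int) :
    ((PySem.Set.inter (pvCounter la).keys (pvCounter lb).keys).flatMap (fun num =>
      if (pvCounter la).getD num 0 > (pvCounter lb).getD num 0 then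
        PySem.List.pyRepeat [num] ((pvCounter lb).getD num 0)
      else
        PySem.List.pyRepeat [num] ((pvCounter la).getD num 0))).count z =
    min (la.count z) (lb.count z) := by
  rw [count_flatMap_eq _ _ _ (nodup_interKeys la lb)]
  · rcases Decidable.em (z ∈ PySem.Set.inter (pvCounter la).keys (pvCounter lb).keys) with h | h
    · rw [if_pos h]
      simp only [pvCounter_getD]
      split_ifs with hgt
      · rw [PySem.List.pyRepeat_singleton, List.count_replicate_self]
        omega
      · rw [PySem.List.pyRepeat_singleton, List.count_replicate_self]
        omega
    · rw [if_neg h]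
      rw [mem_interKeys] at h
      rcases Decidable.not_and_iff_not_or_not.1 h with h | h
        <;> rw [List.count_eq_zero_of_not_mem h] <;> omega
  · intro k _ hk
    split_ifs <;>
      rw [PySem.List.pyRepeat_singleton, List.count_replicate] <;> simp [hk]

-- ===== VERDICT (by name: the statement is the Claim_ definition above) =====
theorem coprime_factor_spec : Claim_equal_coprime_factor := by
  intro a b _ _
  unfold Spec_coprime_factor coprime_factor_alt
  have hA : coprime_factor a b = PySem.List.sorted
      ((PySem.Set.inter (pvCounter (prime_factor a)).keys (pvCounter (prime_factor b)).keys).flatMap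
        (fun num =>
          if (pvCounter (prime_factor a)).getD num 0 > (pvCounter (prime_factor b)).getD num 0 then
            PySem.List.pyRepeat [num] ((pvCounter (prime_factor b)).getD num 0)
          else
            PySem.List.pyRepeat [num] ((pvCounter (prime_factor a)).getD num 0)))
      (fun x => x) false := by
    rw [show coprime_factor a b = PySem.List.sorted
        (List.foldl (fun (r : List Int) (num : Int) =>
          if (pvCounter (prime_factor a)).getD num 0 > (pvCounter (prime_factor b)).getD num 0 then
            r ++ PySem.List.pyRepeat [num] ((pvCounter (prime_factor b)).getD num 0)
          else
            r ++ PySem.List.pyRepeat [num] ((pvCounter (prime_factor a)).getD num 0)) []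
          (PySem.Set.inter (pvCounter (prime_factor a)).keys (pvCounter (prime_factor b)).keys))
        (fun x => x) false from rfl]
    rw [show (fun (r : List Int) (num : Int) =>
          if (pvCounter (prime_factor a)).getD num 0 > (pvCounter (prime_factor b)).getD num 0 then
            r ++ PySem.List.pyRepeat [num] ((pvCounter (prime_factor b)).getD num 0)
          else
            r ++ PySem.List.pyRepeat [num] ((pvCounter (prime_factor a)).getD num 0)) =
        (fun r num => r ++ (fun num =>
          if (pvCounter (prime_factor a)).getD num 0 > (pvCounter (prime_factor b)).getD num 0 then
            PySem.List.pyRepeat [num] ((pvCounter (prime_factor b)).getD num 0)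
          else
            PySem.List.pyRepeat [num] ((pvCounter (prime_factor a)).getD num 0)) num) from by
        funext r num; split_ifs with hc <;> simp [hc],
      PySem.List.foldl_append_eq_flatMap, List.nil_append]
  rw [hA]
  apply PySem.List.sorted_id_eq_of_perm_of_pairwise
  · rw [List.perm_iff_count]
    intro z
    rw [count_pvMerge _ _ _ (prime_factor_pairwise a) (prime_factor_pairwise b),
      countA_eq_min]
  · exact pvMerge_pairwise _ _ (prime_factor_pairwise a)
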